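/-
  THE REAL TOP OF THE DECODER INVARIANT.  `import Vorbis.Invariant` brings in every owner's predicates, the one vocabulary, and:

      Vorbis/Invariant/Blk.lean      the block predicates of a run: `fixedBlocks len`, `runBlk A extra`, their laws
      Vorbis/Invariant/Laws.lean     `groups len : Groups`, `groups_laws len : (groups len).Laws`; the bridges between the forms of HD3
      Vorbis/Invariant/Config.lean   `ConfigOK` (the CONFIG part), `ConfigOK.transfer / frame_decode / frame / carry / reblk`
      Vorbis/Invariant/ReadsBack.lean  `ConfigOK.reads_back`, `ConfigOK.buffers_eq`
      Vorbis/Invariant/Stores.lean   `SampleBuf`, `Separated` (SEP), `StoreOK`, `ConfigOK.frame_stores` (THE per-batch lemma)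
      this file                      `Real.…`: the invariant and the program points for the real groups, with the laws plugged in

  THE NAMES A CONTRACT USES (namespace `Vorbis.Real`; `len` = the ghost length of the input):
      Real.VorbisOK len Blk mem f         = `VorbisOK (groups len) Blk mem f`: `.bits .header .comment .codebooks .floor .finalY .residue
                                          .mapping .mode .buffers .mdct .temp .w1`; each field IS the owner's structure
                                          (`h.floor : FloorsOK Blk mem f`, `h.bits : Bits Blk len mem f`, `h.buffers : Mdct.BuffersOK Blk mem f` …)
      Real.P3 / SD k / SD4 i / SDERR / P5 / FB / InFrame len …     the program points of INVARIANTS §5 (Vorbis/State.lean)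
      Real.VorbisOK.config / of_config    `VorbisOK` = CONFIG ∧ `Bits` ∧ M7 ∧ W1
      Real.VorbisOK.frame_stores          the decode-time frame: CONFIG by `ConfigOK.frame_stores`, the mutable part given afresh
      Real.VorbisOK.frame                 over an allocator call (`ObjSame`)          Real.VorbisOK.carries   the coarse frame
      Real.VorbisOK.moves                 THE TRANSPORT `*f = p`                     Real.VorbisOK.reblk     only `Blk` changed
      Real.SD.deinitOK / SD.err / SD.vorbisOK / P5.of_move / P5.fb / FB.deinitOK / FB.carry     the implications between points
      Real.FB.frame_stores / InFrame.frame_stores      the decode-time frame of a whole point (with SEP carried along)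
-/
import Vorbis.Invariant.Stores
namespace Vorbis
open X86 X86.User Asan

namespace Real

/-! ### The invariant and the points, for the real groups -/

/-- **The decoder invariant `VorbisOK f`** (INVARIANTS §4) for the real groups. -/
abbrev VorbisOK (len : Nat) := Vorbis.VorbisOK (groups len)

/-- P3: stb_vorbis_open_memory after `vorbis_init` and the five stream stores. `A` = the ghost arena and Q0's list of live
non-stack objects. -/
abbrev P3 (len : Nat) (A : Arena × List Obj) := Vorbis.P3 (groups len) A

/-- SD.k: after section `k` of start_decoder. -/
abbrev SD (len k : Nat) (A : Arena × List Obj) := Vorbis.SD (groups len) k A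

/-- SD.4: the head of iteration `i` of the codebook loop. -/
abbrev SD4 (len i : Nat) (A : Arena × List Obj) := Vorbis.SD4 (groups len) i A

/-- SD.ERR: any error return of start_decoder. -/
abbrev SDERR (len : Nat) := Vorbis.SDERR (groups len)

/-- P5: after `f' = vorbis_alloc(&p)` and `*f' = p`. -/
abbrev P5 (len : Nat) (A : Arena × List Obj) := Vorbis.P5 (groups len) A

/-- FB: the frame boundary. -/
abbrev FB (len : Nat) (A : Arena × List Obj) := Vorbis.FB (groups len) A

/-- Inside a frame: one temp block outstanding. -/
abbrev InFrame (len : Nat) (A : Arena × List Obj) := Vorbis.InFrame (groups len) A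

variable {len : Nat} {A : Arena × List Obj} {Blk Blk' : Block → Prop} {Live Live' : Nat → Prop} {mem mem' : Mem}
  {f p R k : Nat}

/-! ### CONFIG ∧ MUTABLE -/

/-- **The CONFIG part of `VorbisOK`.** -/
theorem VorbisOK.config (h : VorbisOK len Blk mem f) : ConfigOK Blk mem f := by
  have hcb := h.codebooks
  have hcnt : 0 ≤ stb_vorbis.codebook_count mem f := by
    have := (CB0.ok hcb.cb0 hcb.nonnull).F1
    omega
  refine ⟨h.header, h.comment, CB0.ok hcb.cb0 hcb.nonnull, hcb.nonnull, ?_, h.floor, h.finalY, h.residue, h.mapping, h.mode,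
    h.buffers.M6, h.mdct, h.temp⟩
  intro i hi
  exact hcb.ok i (by omega)

/-- **`VorbisOK` from its CONFIG part and its mutable part** (`Bits`; M7; W1): how a decode-time function re-assembles the
invariant after `ConfigOK.frame_stores` and its own updates. -/
theorem VorbisOK.of_config (hc : ConfigOK Blk mem f) (hb : Bits Blk len mem f) (h7 : Mdct.M7Range mem f) (hw : W1 mem f) :
    VorbisOK len Blk mem f := by
  have hcnt := hc.cb0.F1
  refine ⟨hb, hc.header, hc.comment, ?_, hc.floor, hc.finalY, hc.residue, hc.mapping, hc.mode, ⟨hc.m6, h7⟩, hc.mdct, hc.temp, hw⟩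
  refine ⟨Or.inr hc.cb0, hc.nonnull, by omega, ?_⟩
  intro i hi
  exact hc.books i (by omega)

/-- The object is an allocated block. -/
theorem VorbisOK.obj (h : VorbisOK len Blk mem f) : Blk (objBlock f) := h.bits.OB1

/-- **THE DECODE-TIME FRAME OF `VorbisOK`**: a batch of stores, each into a hole of `*f`, a sample buffer, or off every allocated
block (`StoreOK`), keeps CONFIG and SEP; with `Bits`, M7, W1 of the new memory (from the function's own stores) the invariant
holds again. `hd` of the result is what `Bits.frame_fields` / `M7Range.transfer` / `W1.transfer` start from when a mutable
field was NOT stored to. -/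
theorem VorbisOK.frame_stores (h : VorbisOK len Blk mem f) (hok : BlkOK Blk) (hsep : Separated Blk mem f)
    {spans : List Span} (hs : Mem.SameExcept spans mem mem') (hw : ∀ s, s ∈ spans → StoreOK Blk mem f s)
    (hb : DecodeSame f mem mem' → Bits Blk len mem' f) (h7 : DecodeSame f mem mem' → Mdct.M7Range mem' f)
    (hw1 : DecodeSame f mem mem' → W1 mem' f) : VorbisOK len Blk mem' f ∧ Separated Blk mem' f := by
  obtain ⟨hc, hsep', hd⟩ := h.config.frame_stores hok h.obj hsep hs hw
  exact ⟨VorbisOK.of_config hc (hb hd) (h7 hd) (hw1 hd), hsep'⟩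

/-- **FRAME of `VorbisOK` over an allocator call** (`*f` unchanged except `setup_offset` / `temp_offset`; the blocks CONFIG reads
kept: an allocator writes `*f`, its own frame and shadow bytes only). -/
theorem VorbisOK.frame (h : VorbisOK len Blk mem f) (hs : ObjSame f mem mem')
    (hk : ∀ B, ConfigOK.Reads mem f B → B.Kept mem mem') : VorbisOK len Blk mem' f :=
  VorbisOK.of_config (h.config.frame hs hk) (h.bits.frame hs) (h.buffers.M7.frame hs) (h.w1.frame hs)

/-- The blocks `VorbisOK` mentions in SHAPE clauses, besides `*f` and the input. -/
abbrev VorbisOK.Owns (mem : Mem) (f : Nat) : Block → Prop := ConfigOK.Owns mem f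

/-- **Only the block predicate changed** (stb_vorbis_open_memory returns and `objBlock p` leaves `Blk`; a callee's frame objects
come and go): the owned blocks, the object and the input are still allocated. -/
theorem VorbisOK.reblk (h : VorbisOK len Blk mem f) (hok : BlkOK Blk) (hB : ∀ B, ConfigOK.Owns mem f B → Blk B → Blk' B)
    (hob : Blk' (objBlock f)) (hin : Blk' (inBlock len)) : VorbisOK len Blk' mem f :=
  VorbisOK.of_config (h.config.reblk hok hB) (h.bits.reblk hob hin) h.buffers.M7 h.w1

/-! ### The laws, plugged in -/

/-- **THE TRANSPORT `*f = p`.** -/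
theorem VorbisOK.moves (len : Nat) : Group.Moves (VorbisOK len) := Vorbis.VorbisOK.moves (groups_laws len)

/-- The coarse frame: the memory changed outside the allocated blocks only. -/
theorem VorbisOK.carries (len : Nat) : Group.Carries (VorbisOK len) := Vorbis.VorbisOK.carries (groups_laws len)

/-- `VorbisOK ⇒ DeinitOK`, given `alloc_buffer ≠ 0`. -/
theorem VorbisOK.deinitOK (h : VorbisOK len Blk mem f) (hbuf : stb_vorbis.alloc.alloc_buffer mem f ≠ 0) :
    DeinitOK Blk mem f := Vorbis.VorbisOK.deinitOK (groups_laws len) h hbuf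

/-- HD3 in the form the MDCT lemmas take. -/
theorem VorbisOK.hd3 (h : VorbisOK len Blk mem f) : Mdct.HD3 mem f := HD3.toMdct (HeaderOK.HD3 h.header)

/-- `DeinitOK(&p)` at every cut point of start_decoder. -/
theorem SD.deinitOK (h : SD len k A Blk Live mem f R) : DeinitOK Blk mem f := Vorbis.SD.deinitOK (groups_laws len) h

/-- Every cut point of start_decoder satisfies SD.ERR. -/
theorem SD.err (h : SD len k A Blk Live mem f R) : SDERR len Blk Live mem f := Vorbis.SD.err (groups_laws len) h

/-- P3 satisfies SD.ERR. -/
theorem P3.err (h : P3 len A Blk Live mem f) : SDERR len Blk Live mem f := Vorbis.P3.err (groups_laws len) h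

/-- SD.12 is full `VorbisOK(&p)`. -/
theorem SD.vorbisOK (h : SD len 12 A Blk Live mem f R) : VorbisOK len Blk mem f := Vorbis.SD.vorbisOK (groups_laws len) h

/-- SD.12 → P5: the composition of stb_vorbis_open_memory around `vorbis_alloc` and `memcpy`. -/
theorem P5.of_move {A' : Arena × List Obj} (hm : Move Blk Blk' mem mem' p f) (henv : Env Blk' Live' mem)
    (h : VorbisOK len Blk mem p) (hado : ADO A'.1 A'.2 mem p) (hself : A'.1.Blk (objBlock f))
    (hfirst : stb_vorbis.first_decode mem p = 1) : P5 len A' Blk' Live' mem' f :=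
  Vorbis.P5.of_move (groups_laws len) hm henv h hado hself hfirst

/-- P5 is a frame boundary. -/
theorem P5.fb (h : P5 len A Blk Live mem f) : FB len A Blk Live mem f 0 0 := Vorbis.P5.fb h

/-- FB gives DeinitOK (stb_vorbis_close). -/
theorem FB.deinitOK {stored room : Int} (h : FB len A Blk Live mem f stored room) : DeinitOK Blk mem f :=
  Vorbis.FB.deinitOK (groups_laws len) h

/-- The coarse frame of FB. -/
theorem FB.carry {stored room : Int} (h : FB len A Blk Live mem f stored room) (ha : AllKept Blk mem mem')
    (hsh : Mem.EqOn 0xC00000 0xE00000 mem mem') (hado : ADO A.1 A.2 mem' f) : FB len A Blk Live mem' f stored room :=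
  Vorbis.FB.carry (groups_laws len) h ha hsh hado

/-- **The decode-time frame of FB**: a batch of `StoreOK` stores that also leaves the shadow and the arena fields alone; the
mutable part re-established by the function. -/
theorem FB.frame_stores {stored room : Int} (h : FB len A Blk Live mem f stored room) (hsep : Separated Blk mem f)
    {spans : List Span} (hs : Mem.SameExcept spans mem mem') (hw : ∀ s, s ∈ spans → StoreOK Blk mem f s)
    (hsh : Mem.EqOn 0xC00000 0xE00000 mem mem') (hado : ADO A.1 A.2 mem' f)
    (hb : DecodeSame f mem mem' → Bits Blk len mem' f) (h7 : DecodeSame f mem mem' → Mdct.M7Range mem' f)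
    (hw1 : DecodeSame f mem mem' → W1 mem' f) : FB len A Blk Live mem' f stored room ∧ Separated Blk mem' f := by
  obtain ⟨hv, hsep'⟩ := VorbisOK.frame_stores h.vorbis h.env.ok hsep hs hw hb h7 hw1
  exact ⟨⟨h.env.eqOn hsh, hv, hado, h.stored_nonneg, h.stored_le⟩, hsep'⟩

/-- **The decode-time frame inside a frame** (one temp block outstanding: decode_residue between its allocation and `done:`,
inverse_mdct between its allocation and its restore): the same, with `ADOBusy` carried by the function. -/
theorem InFrame.frame_stores {sz : Nat} (h : InFrame len A Blk Live mem f sz) (hsep : Separated Blk mem f)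
    {spans : List Span} (hs : Mem.SameExcept spans mem mem') (hw : ∀ s, s ∈ spans → StoreOK Blk mem f s)
    (hsh : Mem.EqOn 0xC00000 0xE00000 mem mem') (hbusy : ADOBusy A.1 A.2 mem' f sz)
    (hb : DecodeSame f mem mem' → Bits Blk len mem' f) (h7 : DecodeSame f mem mem' → Mdct.M7Range mem' f)
    (hw1 : DecodeSame f mem mem' → W1 mem' f) : InFrame len A Blk Live mem' f sz ∧ Separated Blk mem' f := by
  obtain ⟨hv, hsep'⟩ := VorbisOK.frame_stores h.vorbis h.env.ok hsep hs hw hb h7 hw1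
  exact ⟨⟨h.env.eqOn hsh, hv, hbusy⟩, hsep'⟩

end Real

end Vorbis
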